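-- pv_equiv track=rewrite | github.com/TEAMLAB-Lecture/morsecode-Usurper47 | morsecode.py | is_validated_english_sentence
-- ===== SOURCE A (Python) =====
-- def is_validated_english_sentence(user_input:str):
--     new = ''
--     for u in user_input:
--       if (u.isdigit()) or (u in r"""_@#$%^&*()-+=[]{}"';:\|`~"""):
--         return False
--       if not u in " .,!?":
--         new += u
--     if not new: # new가 공백이라면
--       return False
--     return True
-- ===== SOURCE B (Python) =====
-- SPECIAL = r"""_@#$%^&*()-+=[]{}"';:\|`~"""
--
-- def is_validated_english_sentence(user_input: str):
--     bad = sum(c.isdigit() or c in SPECIAL for c in user_input)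
--     separators = sum(user_input.count(ch) for ch in " .,!?")
--     return bad == 0 and separators < len(user_input)
-- ===== Notes on version B (the rewrite author's own statement) =====
-- stated objective: alternative
-- what changed: Replaces A's accumulating early-return loop by an arithmetic formulation: count the forbidden characters (digits/specials) and the separator occurrences, and return (bad count == 0) and (separator count < length), with no accumulation and no early exit.
import Mathlib
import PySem

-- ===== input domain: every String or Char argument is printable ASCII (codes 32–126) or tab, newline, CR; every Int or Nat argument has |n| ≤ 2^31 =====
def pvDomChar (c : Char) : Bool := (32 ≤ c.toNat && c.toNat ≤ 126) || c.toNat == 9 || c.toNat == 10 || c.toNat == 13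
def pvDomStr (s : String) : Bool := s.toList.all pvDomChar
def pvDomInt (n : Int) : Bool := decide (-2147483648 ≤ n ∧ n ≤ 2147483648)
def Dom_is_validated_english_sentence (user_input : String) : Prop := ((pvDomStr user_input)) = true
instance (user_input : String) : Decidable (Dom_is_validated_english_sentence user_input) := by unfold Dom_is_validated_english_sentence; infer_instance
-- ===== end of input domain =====

-- B answers by counting (bad chars = 0 and separator occurrences < length) instead of A's accumulating early-return loop; return value only, no side effects.

-- ===== PORT A =====
-- the raw punctuation string from A and the separator string, shared as literals by both ports
def pvSpecialChars : List Char := "_@#$%^&*()-+=[]{}\"';:\\|`~".toList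
def pvSepChars : List Char := " .,!?".toList

-- the for-loop of A with its early returns: state = the accumulated string `new`
def pvLoopA : List Char → List Char → Bool
  | [], new => if new.isEmpty then false else true
  | u :: rest, new =>
    if PySem.Chars.isdigit u || pvSpecialChars.contains u then false
    else if !(pvSepChars.contains u) then pvLoopA rest (new ++ [u])
    else pvLoopA rest new

def is_validated_english_sentence (user_input : String) : Bool :=
  pvLoopA user_input.toList []

-- ===== PORT B =====
def is_validated_english_sentence_alt (user_input : String) : Bool :=
  let bad : Nat := (user_input.toList.map
    (fun c => if PySem.Chars.isdigit c || pvSpecialChars.contains c then 1 else 0)).sum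
  let separators : Nat := (pvSepChars.map
    (fun ch => user_input.toList.count ch)).sum
  decide (bad = 0) && decide (separators < user_input.toList.length)

-- ===== PRECONDITION & SPEC =====
def Spec_is_validated_english_sentence (user_input : String) (out : Bool) : Prop := out = is_validated_english_sentence_alt user_input
instance (user_input : String) (out : Bool) : Decidable (Spec_is_validated_english_sentence user_input out) := by unfold Spec_is_validated_english_sentence; infer_instance

-- ===== CLAIM (what is proved, stated in full; the proofs are below) =====
def Claim_equal_is_validated_english_sentence : Prop := ∀ (user_input : String), Dom_is_validated_english_sentence user_input → Spec_is_validated_english_sentence user_input (is_validated_english_sentence user_input)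

-- ===== LEMMAS AND PROOFS =====

theorem pvLoopA_eq (l new : List Char) :
    pvLoopA l new =
      if l.any (fun u => PySem.Chars.isdigit u || pvSpecialChars.contains u) then false
      else (!new.isEmpty || l.any fun u => !(pvSepChars.contains u)) := by
  induction l generalizing new with
  | nil => cases new <;> simp [pvLoopA]
  | cons u rest ih =>
    rw [pvLoopA]
    by_cases hb : (PySem.Chars.isdigit u || pvSpecialChars.contains u) = true
    · rw [if_pos hb, List.any_cons, hb]
      simp
    · have hb' : (PySem.Chars.isdigit u || pvSpecialChars.contains u) = false := by
        simpa using hb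
      rw [if_neg hb, List.any_cons, hb', Bool.false_or, List.any_cons]
      by_cases hc : (!(pvSepChars.contains u)) = true
      · rw [if_pos hc, ih, hc, Bool.true_or]
        have he : (new ++ [u]).isEmpty = false := by simp
        rw [he]
        by_cases hr : (rest.any fun u => PySem.Chars.isdigit u || pvSpecialChars.contains u) = true
        · rw [if_pos hr, if_pos hr]
        · rw [if_neg hr, if_neg hr]
          simp
      · have hc' : (!(pvSepChars.contains u)) = false := by simpa using hc
        rw [if_neg hc, ih, hc', Bool.false_or]

-- the boolean sum of B counts exactly the bad characters
theorem pvSumIte_eq_countP (l : List Char) (p : Char → Bool) :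
    (l.map (fun c => if p c then 1 else 0)).sum = l.countP p := by
  induction l with
  | nil => simp
  | cons c l ih =>
    by_cases h : p c = true <;>
      simp [h, ih, Nat.add_comm]

-- auxiliary: countP for a disjunction with a fresh head char
theorem pvCountP_or (c : Char) (m : List Char) (hc : c ∉ m) (l : List Char) :
    l.countP (fun u => u == c || m.contains u) = l.count c + l.countP (fun u => m.contains u) := by
  induction l with
  | nil => simp
  | cons u l ih =>
    simp only [List.countP_cons, List.count_cons, ih]
    by_cases hu : u = c
    · subst hu
      have hm : u ∉ m := hc
      simp [hm]
      omega
    · have h1 : (u == c) = false := by simpa using hu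
      simp only [h1, Bool.false_or]
      by_cases hm' : m.contains u = true <;> simp <;> omega

-- the per-separator counts of B sum to one countP over the string (separator chars are distinct)
theorem pvSumCount_eq_countP (m : List Char) (hm : m.Nodup) (l : List Char) :
    (m.map (fun ch => l.count ch)).sum = l.countP (fun u => m.contains u) := by
  induction m with
  | nil => simp
  | cons c m ih =>
    have hc : c ∉ m := (List.nodup_cons.mp hm).1
    have ih' := ih (List.nodup_cons.mp hm).2
    have hcp : l.countP (fun u => (c :: m).contains u) = l.countP (fun u => u == c || m.contains u) := by
      apply List.countP_congr
      intro a _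
      simp
    simp only [List.map_cons, List.sum_cons, ih', hcp, pvCountP_or c m hc l]

theorem pvSep_nodup : pvSepChars.Nodup := by decide

-- ===== VERDICT (by name: the statement is the Claim_ definition above) =====
theorem is_validated_english_sentence_spec : Claim_equal_is_validated_english_sentence := by
  intro s _
  unfold Spec_is_validated_english_sentence is_validated_english_sentence
  simp only [is_validated_english_sentence_alt]
  rw [pvLoopA_eq, pvSumIte_eq_countP, pvSumCount_eq_countP _ pvSep_nodup]
  by_cases hb : (s.toList.any fun u => PySem.Chars.isdigit u || pvSpecialChars.contains u) = true
  · rw [if_pos hb]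
    have : s.toList.countP (fun u => PySem.Chars.isdigit u || pvSpecialChars.contains u) ≠ 0 := by
      rw [Ne, List.countP_eq_zero]
      simp only [List.any_eq_true] at hb
      obtain ⟨x, hx, hp⟩ := hb
      intro h; exact absurd hp (by simpa using h x hx)
    have hd : (decide (s.toList.countP (fun c => PySem.Chars.isdigit c || pvSpecialChars.contains c) = 0)) = false := by
      simpa using this
    rw [hd, Bool.false_and]
  · have hb' : (s.toList.any fun u => PySem.Chars.isdigit u || pvSpecialChars.contains u) = false := by
      simpa using hb
    rw [if_neg hb]
    have h0 : s.toList.countP (fun u => PySem.Chars.isdigit u || pvSpecialChars.contains u) = 0 := by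
      rw [List.countP_eq_zero]
      intro a ha
      have := List.any_eq_false.mp hb' a ha
      simpa using this
    simp only [h0, decide_true, Bool.true_and, List.isEmpty_nil, Bool.not_true, Bool.false_or]
    have hlen := @List.length_eq_countP_add_countP Char (fun u => pvSepChars.contains u) s.toList
    have hcp : s.toList.countP (fun a => decide ¬((fun u => pvSepChars.contains u) a = true))
        = s.toList.countP (fun u => !pvSepChars.contains u) := by
      apply List.countP_congr
      intro a _
      simp
    rw [hcp] at hlen
    have hany : (s.toList.any fun u => !pvSepChars.contains u)
        = decide (0 < s.toList.countP (fun u => !pvSepChars.contains u)) := by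
      apply Bool.eq_iff_iff.mpr
      simp [List.any_eq_true, List.countP_pos_iff]
    rw [hany]
    have hiff : (0 < s.toList.countP (fun u => !pvSepChars.contains u))
        ↔ (s.toList.countP (fun u => pvSepChars.contains u) < s.toList.length) := by
      omega
    exact decide_eq_decide.mpr hiff
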